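-- pv_equiv track=rewrite | github.com/whyman903/LSTM-Code-Summarization | get_data.py | strip_leading_type_parameters
-- ===== SOURCE A (Python) =====
-- def strip_leading_type_parameters(text: str) -> str:
--     compact = text.lstrip()
--     if not compact.startswith("<"):
--         return compact
--
--     depth = 0
--     pos = 0
--     while pos < len(compact):
--         char = compact[pos]
--         if char == "<":
--             depth += 1
--         elif char == ">":
--             depth -= 1
--             if depth == 0:
--                 return compact[pos + 1 :].lstrip()
--         pos += 1
--     return compact
-- ===== SOURCE B (Python) =====
-- def strip_leading_type_parameters(text: str) -> str:
--     compact = text.lstrip()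
--     if not compact.startswith("<"):
--         return compact
--     depths = []
--     total = 0
--     for ch in compact:
--         total += 1 if ch == "<" else -1 if ch == ">" else 0
--         depths.append(total)
--     for i, d in enumerate(depths):
--         if d == 0:
--             return compact[i + 1:].lstrip()
--     return compact
-- ===== Notes on version B (the rewrite author's own statement) =====
-- stated objective: alternative
-- what changed: Replaces the stateful while-loop with conditional early return by a two-phase table computation: first build the full prefix-sum depth table over the string, then scan it for the first index where the cumulative depth is 0 and slice there.
import Mathlib
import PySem

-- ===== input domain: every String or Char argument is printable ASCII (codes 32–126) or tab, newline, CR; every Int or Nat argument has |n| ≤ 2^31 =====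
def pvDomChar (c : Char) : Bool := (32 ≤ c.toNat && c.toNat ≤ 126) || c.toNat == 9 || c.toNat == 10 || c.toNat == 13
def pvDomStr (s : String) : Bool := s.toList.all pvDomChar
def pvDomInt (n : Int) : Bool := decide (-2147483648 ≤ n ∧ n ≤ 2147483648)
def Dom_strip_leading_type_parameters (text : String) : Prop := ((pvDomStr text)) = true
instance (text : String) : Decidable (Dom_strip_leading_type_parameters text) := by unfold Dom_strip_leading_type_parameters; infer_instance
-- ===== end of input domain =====

-- B replaces A's stateful early-return while-loop by a two-phase decomposition (build the
-- full prefix-sum depth table, then scan it for the first zero); same cost, alternative structure.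

-- ===== PORT A =====
-- A's while-loop over `pos`, transliterated as structural recursion over the suffix of
-- `compact` starting at `pos` (compact[pos+1:] is exactly the tail of that suffix);
-- `none` means the loop fell off the end (A then returns `compact`).
def stripLoopA (depth : Int) : List Char → Option (List Char)
  | [] => none
  | c :: rest =>
    if c = '<' then stripLoopA (depth + 1) rest
    else if c = '>' then
      let d := depth - 1
      if d = 0 then some (PySem.Chars.lstrip rest) else stripLoopA d rest
    else stripLoopA depth rest

def strip_leading_type_parameters (text : String) : String :=
  let compact := PySem.Chars.lstrip text.toList
  if ¬ (PySem.Chars.startswith compact ['<'] = true) then String.ofList compact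
  else
    match stripLoopA 0 compact with
    | some r => String.ofList r
    | none => String.ofList compact

-- ===== PORT B =====
def pvDelta (c : Char) : Int := if c = '<' then 1 else if c = '>' then -1 else 0

-- the running prefix-sum depth table (Python B's `depths` list)
def pvDepths (total : Int) : List Char → List Int
  | [] => []
  | c :: rest => (total + pvDelta c) :: pvDepths (total + pvDelta c) rest

def strip_leading_type_parameters_alt (text : String) : String :=
  let compact := PySem.Chars.lstrip text.toList
  if ¬ (PySem.Chars.startswith compact ['<'] = true) then String.ofList compact
  else
    match (pvDepths 0 compact).findIdx? (· == 0) with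
    | some i => String.ofList (PySem.Chars.lstrip (compact.drop (i + 1)))
    | none => String.ofList compact

-- ===== PRECONDITION & SPEC =====
def Spec_strip_leading_type_parameters (text : String) (out : String) : Prop := out = strip_leading_type_parameters_alt text
instance (text : String) (out : String) : Decidable (Spec_strip_leading_type_parameters text out) := by unfold Spec_strip_leading_type_parameters; infer_instance

-- ===== CLAIM (what is proved, stated in full; the proofs are below) =====
def Claim_equal_strip_leading_type_parameters : Prop := ∀ (text : String), Dom_strip_leading_type_parameters text → Spec_strip_leading_type_parameters text (strip_leading_type_parameters text)

-- ===== LEMMAS AND PROOFS =====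

-- index of the first position whose running depth (starting from d) is 0
def pvIdxZero (d : Int) : List Char → Option Nat
  | [] => none
  | c :: rest =>
    if d + pvDelta c = 0 then some 0 else (pvIdxZero (d + pvDelta c) rest).map (· + 1)

lemma findIdx?_depths (cs : List Char) : ∀ d : Int,
    (pvDepths d cs).findIdx? (· == 0) = pvIdxZero d cs := by
  induction cs with
  | nil => intro d; simp [pvDepths, pvIdxZero]
  | cons c rest ih =>
    intro d
    simp only [pvDepths, pvIdxZero, List.findIdx?_cons]
    by_cases h : d + pvDelta c = 0 <;> simp [h, ih]

lemma loopA_eq (cs : List Char) : ∀ d : Int, 0 < d →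
    stripLoopA d cs = (pvIdxZero d cs).map (fun j => PySem.Chars.lstrip (cs.drop (j + 1))) := by
  induction cs with
  | nil => intro d _; simp [stripLoopA, pvIdxZero]
  | cons c rest ih =>
    intro d hd
    by_cases h1 : c = '<'
    · subst h1
      rw [show stripLoopA d ('<' :: rest) = stripLoopA (d + 1) rest from rfl,
          show pvIdxZero d ('<' :: rest)
             = if d + 1 = 0 then some 0 else (pvIdxZero (d + 1) rest).map (· + 1) from by
            simp [pvIdxZero, pvDelta],
          if_neg (by omega : ¬ (d + 1 : Int) = 0), ih (d + 1) (by omega)]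
      cases pvIdxZero (d + 1) rest <;> simp
    · by_cases h2 : c = '>'
      · subst h2
        rw [show stripLoopA d ('>' :: rest)
              = if d - 1 = 0 then some (PySem.Chars.lstrip rest) else stripLoopA (d - 1) rest
            from rfl,
            show pvIdxZero d ('>' :: rest)
              = if d - 1 = 0 then some 0 else (pvIdxZero (d - 1) rest).map (· + 1) from by
              simp [pvIdxZero, pvDelta, show d + -1 = d - 1 by omega]]
        by_cases h3 : d - 1 = 0
        · simp [h3]
        · rw [if_neg h3, if_neg h3, ih (d - 1) (by omega)]
          cases pvIdxZero (d - 1) rest <;> simp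
      · rw [show stripLoopA d (c :: rest) = stripLoopA d rest from by
            simp [stripLoopA, h1, h2],
            show pvIdxZero d (c :: rest)
              = if d = 0 then some 0 else (pvIdxZero d rest).map (· + 1) from by
              simp [pvIdxZero, pvDelta, h1, h2],
            if_neg (by omega : ¬ d = 0), ih d hd]
        cases pvIdxZero d rest <;> simp

-- ===== VERDICT (by name: the statement is the Claim_ definition above) =====
theorem strip_leading_type_parameters_spec : Claim_equal_strip_leading_type_parameters := by
  intro text _
  unfold Spec_strip_leading_type_parameters strip_leading_type_parameters strip_leading_type_parameters_alt
  set compact := PySem.Chars.lstrip text.toList with hc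
  by_cases hs : PySem.Chars.startswith compact ['<'] = true
  · simp only [hs, not_true, if_false]
    obtain ⟨rest, hr⟩ : ∃ rest, compact = '<' :: rest := by
      rcases (PySem.Chars.startswith_iff compact ['<']).mp hs with ⟨t, ht⟩
      exact ⟨t, ht.symm⟩
    rw [hr]
    have hstep : stripLoopA 0 ('<' :: rest) = stripLoopA 1 rest := by
      simp [stripLoopA]
    have hdep : pvDepths 0 ('<' :: rest) = 1 :: pvDepths 1 rest := by
      simp [pvDepths, pvDelta]
    rw [hstep, hdep, loopA_eq rest 1 (by omega)]
    simp only [List.findIdx?_cons, show ((1 : Int) == 0) = false by decide,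
      findIdx?_depths]
    cases hz : pvIdxZero 1 rest with
    | none => rfl
    | some j => simp [List.drop_succ_cons]
  · simp [hs]
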